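-- pv_equiv track=rewrite | github.com/kgicheha/CodingLeetcode | PythonPrep/winningLotteryTicket.py | winningLotteryTicket
-- ===== SOURCE A (Python) =====
-- def winningLotteryTicket(tickets):
--     winning_pair_count = 0
--     nums = ['0', '1', '2', '3', '4', '5', '6', '7', '8', '9']
--     lp = 0
--     rp = 1
--
--     while(rp < len(tickets)) and (lp < len(tickets) - 1):
--         ticket_comb = tickets[lp] + tickets[rp]
--
--
--         if set(ticket_comb) == set(nums):
--             winning_pair_count += 1
--         rp += 1
--
--         if(rp == len(tickets)):
--             lp += 1
--             rp = lp + 1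
--
--     return winning_pair_count
-- ===== SOURCE B (Python) =====
-- def winningLotteryTicket(tickets):
--     # reduce each ticket to a 10-bit digit mask (-1 if it contains a non-digit,
--     # since such a ticket can never be part of a winning pair), then count pairs
--     # whose masks OR to 1023 -- no per-pair set building.
--     masks = []
--     for t in tickets:
--         m = 0
--         for c in t:
--             if '0' <= c <= '9':
--                 m = m | (1 << (ord(c) - 48))
--             else:
--                 m = -1
--                 break
--         masks.append(m)
--     total = 0
--     while masks:
--         m = masks[0]
--         rest = masks[1:]
--         if m >= 0:
--             total += sum(1 for m2 in rest if m2 >= 0 and (m | m2) == 1023)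
--         masks = rest
--     return total
-- ===== Notes on version B (the rewrite author's own statement) =====
-- stated objective: faster
-- what changed: B precomputes a 10-bit digit mask per ticket (-1 if the ticket has a non-digit character) in one pass and counts pairs whose masks OR to 1023, instead of building and comparing a character set for every pair as A does.
import Mathlib
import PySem

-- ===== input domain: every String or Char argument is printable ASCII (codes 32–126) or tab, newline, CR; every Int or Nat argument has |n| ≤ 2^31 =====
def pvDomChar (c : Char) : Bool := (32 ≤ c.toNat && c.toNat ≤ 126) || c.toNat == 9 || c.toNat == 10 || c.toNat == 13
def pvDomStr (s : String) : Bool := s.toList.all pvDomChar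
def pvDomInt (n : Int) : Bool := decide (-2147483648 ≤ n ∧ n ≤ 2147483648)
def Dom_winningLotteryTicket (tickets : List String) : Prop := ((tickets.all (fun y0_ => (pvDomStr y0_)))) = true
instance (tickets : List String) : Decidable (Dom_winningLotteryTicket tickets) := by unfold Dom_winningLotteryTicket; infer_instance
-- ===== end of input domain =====

-- B replaces A's per-pair string concatenation and set comparison by a 10-bit digit mask
-- computed once per ticket, then counts pairs whose masks OR to 1023 (objective: faster).

-- ===== PORT A =====
-- nums = ['0','1',…,'9']
def pvNums : List Char := ['0', '1', '2', '3', '4', '5', '6', '7', '8', '9']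

-- A's while loop, state (lp, rp, winning_pair_count)
def pvALoop (tickets : List String) (lp rp : Nat) (acc : Int) : Int :=
  if h : rp < tickets.length ∧ lp < tickets.length - 1 then
    -- ticket_comb = tickets[lp] + tickets[rp]  (set() iterates its characters)
    let comb : List Char :=
      (PySem.List.pyGetD tickets (lp : Int) "").toList ++ (PySem.List.pyGetD tickets (rp : Int) "").toList
    let acc' := if PySem.Set.equal (PySem.Set.ofList comb) (PySem.Set.ofList pvNums) then acc + 1 else acc
    if rp + 1 = tickets.length then pvALoop tickets (lp + 1) (lp + 2) acc'
    else pvALoop tickets lp (rp + 1) acc'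
  else acc
termination_by (tickets.length - lp, tickets.length - rp)
decreasing_by
  · exact Prod.Lex.left _ _ (by omega)
  · exact Prod.Lex.right _ (by omega)

def winningLotteryTicket (tickets : List String) : Int :=
  pvALoop tickets 0 1 0

-- ===== PORT B =====
-- inner character loop of Source B: m accumulates digit bits, -1 on the first non-digit (break)
def pvMask (cs : List Char) (m : Int) : Int :=
  match cs with
  | [] => m
  | c :: rest =>
      if '0' ≤ c ∧ c ≤ '9' then pvMask rest (PySem.Int.bor m ((1 : Int) <<< (c.toNat - 48)))
      else -1

-- the while loop of Source B: pop the head mask, count compatible partners in the rest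
def pvBLoop (masks : List Int) (total : Int) : Int :=
  match masks with
  | [] => total
  | m :: rest =>
      let total' :=
        if 0 ≤ m then
          total + (rest.countP (fun m2 => decide (0 ≤ m2) && (PySem.Int.bor m m2 == 1023)) : Int)
        else total
      pvBLoop rest total'

def winningLotteryTicket_alt (tickets : List String) : Int :=
  pvBLoop (tickets.map (fun t => pvMask t.toList 0)) 0

-- ===== PRECONDITION & SPEC =====
def Spec_winningLotteryTicket (tickets : List String) (out : Int) : Prop := out = winningLotteryTicket_alt tickets
instance (tickets : List String) (out : Int) : Decidable (Spec_winningLotteryTicket tickets out) := by unfold Spec_winningLotteryTicket; infer_instance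

-- ===== CLAIM (what is proved, stated in full; the proofs are below) =====
def Claim_equal_winningLotteryTicket : Prop := ∀ (tickets : List String), Dom_winningLotteryTicket tickets → Spec_winningLotteryTicket tickets (winningLotteryTicket tickets)

-- ===== LEMMAS AND PROOFS =====

-- A's per-pair predicate
def pvPA (s t : String) : Bool :=
  PySem.Set.equal (PySem.Set.ofList (s.toList ++ t.toList)) (PySem.Set.ofList pvNums)

-- the pair count, one row per element
def pvRows : List String → Int
  | [] => 0
  | s :: rest => (rest.countP (pvPA s) : Int) + pvRows rest

-- Nat-level mask of an all-digit char list
def pvNatMask (cs : List Char) (n : Nat) : Nat :=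
  match cs with
  | [] => n
  | c :: rest => pvNatMask rest (n ||| (1 <<< (c.toNat - 48)))

theorem pvMask_neg (cs : List Char) (m : Int)
    (h : ¬ ∀ c ∈ cs, '0' ≤ c ∧ c ≤ '9') : pvMask cs m = -1 := by
  induction cs generalizing m with
  | nil => simp at h
  | cons c rest ih =>
    simp only [pvMask]
    split
    · rename_i hc
      apply ih
      intro hall
      exact h (fun x hx => (List.mem_cons.mp hx).elim (fun he => he ▸ hc) (fun he => hall x he))
    · rfl

theorem pvMask_eq_natMask (cs : List Char) (n : Nat)
    (h : ∀ c ∈ cs, '0' ≤ c ∧ c ≤ '9') : pvMask cs (n : Int) = (pvNatMask cs n : Int) := by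
  induction cs generalizing n with
  | nil => rfl
  | cons c rest ih =>
    have hc := h c (by simp)
    simp only [pvMask, pvNatMask, hc, and_self, if_true]
    rw [show (1 : Int) <<< (c.toNat - 48) = ((1 <<< (c.toNat - 48) : Nat) : Int) from Int.mem_toNat?.mp rfl,
        PySem.Int.bor_natCast]
    exact ih _ (fun x hx => h x (List.mem_cons_of_mem _ hx))

theorem pvNatMask_lt (cs : List Char) (n : Nat) (hn : n < 1024)
    (h : ∀ c ∈ cs, '0' ≤ c ∧ c ≤ '9') : pvNatMask cs n < 1024 := by
  induction cs generalizing n with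
  | nil => exact hn
  | cons c rest ih =>
    have hc := h c (by simp)
    have hlt : c.toNat - 48 < 10 := by
      have h2 : c.toNat ≤ 57 := hc.2
      omega
    simp only [pvNatMask]
    have h1 : (1 <<< (c.toNat - 48) : Nat) < 1024 := by
      rw [Nat.shiftLeft_eq, one_mul]
      calc (2:Nat) ^ (c.toNat - 48) < 2 ^ 10 := Nat.pow_lt_pow_right (by norm_num) hlt
        _ = 1024 := by norm_num
    have hor := Nat.or_lt_two_pow (n := 10) (x := n) (y := 1 <<< (c.toNat - 48)) (by norm_num [hn]) (by norm_num [h1])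
    exact ih _ (by norm_num at hor; omega) (fun x hx => h x (List.mem_cons_of_mem _ hx))

theorem pvNatMask_testBit (cs : List Char) (n : Nat) (d : Nat) (hd : d < 10)
    (h : ∀ c ∈ cs, '0' ≤ c ∧ c ≤ '9') :
    ((pvNatMask cs n).testBit d ↔ n.testBit d ∨ Char.ofNat (48 + d) ∈ cs) := by
  induction cs generalizing n with
  | nil => simp [pvNatMask]
  | cons c rest ih =>
    have hc := h c (by simp)
    have hrange : 48 ≤ c.toNat ∧ c.toNat ≤ 57 := ⟨hc.1, hc.2⟩
    simp only [pvNatMask]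
    rw [ih _ (fun x hx => h x (List.mem_cons_of_mem _ hx))]
    rw [Nat.testBit_or]
    have hbit : (1 <<< (c.toNat - 48) : Nat).testBit d = decide (c.toNat - 48 = d) := by
      rw [Nat.shiftLeft_eq, one_mul, Nat.testBit_two_pow]
    have hchar : (Char.ofNat (48 + d) = c) ↔ c.toNat - 48 = d := by
      constructor
      · intro he
        have : c.toNat = 48 + d := by
          rw [← he, Char.toNat_ofNat]
          have : (48 + d).isValidChar := by
            constructor; omega
          simp [this]
        omega
      · intro he
        have : 48 + d = c.toNat := by omega
        rw [this, Char.ofNat_toNat]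
    constructor
    · intro hh
      rcases hh with hh | hh
      · rcases Bool.or_eq_true_iff.mp hh with h1 | h1
        · exact Or.inl h1
        · right
          rw [hbit] at h1
          have he := hchar.mpr (by simpa using h1)
          exact List.mem_cons.mpr (Or.inl he)
      · right; exact List.mem_cons_of_mem _ hh
    · intro hh
      rcases hh with hh | hh
      · left; rw [Bool.or_eq_true_iff]; exact Or.inl hh
      · rcases List.mem_cons.mp hh with he | he
        · left; rw [Bool.or_eq_true_iff]; right; rw [hbit]; simp [hchar.mp he]
        · right; exact he

theorem mem_pvNums_iff (x : Char) : x ∈ pvNums ↔ '0' ≤ x ∧ x ≤ '9' := by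
  constructor
  · intro hx
    fin_cases hx <;> decide
  · rintro ⟨h1, h2⟩
    have hlo : 48 ≤ x.toNat := h1
    have hhi : x.toNat ≤ 57 := h2
    have hd : x.toNat - 48 < 10 := by omega
    have hx : x = Char.ofNat (48 + (x.toNat - 48)) := by
      have : 48 + (x.toNat - 48) = x.toNat := by omega
      rw [this, Char.ofNat_toNat]
    rw [hx]
    interval_cases h : (x.toNat - 48) <;> decide

-- crux: A's set comparison on a pair ⟺ B's mask condition
theorem pvPA_eq_mask (s t : String) :
    pvPA s t = (decide (0 ≤ pvMask s.toList 0) && decide (0 ≤ pvMask t.toList 0) &&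
      (PySem.Int.bor (pvMask s.toList 0) (pvMask t.toList 0) == 1023)) := by
  rw [Bool.eq_iff_iff]
  set cs := s.toList
  set ds := t.toList
  have hLHS : pvPA s t = true ↔ (∀ x, x ∈ cs ++ ds ↔ x ∈ pvNums) := by
    rw [pvPA, PySem.Set.equal_iff]
    constructor
    · intro hh x; rw [← PySem.Set.mem_ofList (cs ++ ds) x, ← PySem.Set.mem_ofList pvNums x]; exact hh x
    · intro hh x; rw [PySem.Set.mem_ofList, PySem.Set.mem_ofList]; exact hh x
  rw [hLHS]
  by_cases hcs : ∀ c ∈ cs, '0' ≤ c ∧ c ≤ '9'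
  case neg =>
    rw [pvMask_neg cs 0 hcs]
    simp only [Bool.and_eq_true, decide_eq_true_eq]
    constructor
    · intro hh
      push_neg at hcs
      obtain ⟨c, hc, hnd⟩ := hcs
      obtain ⟨ha, hb⟩ := (mem_pvNums_iff c).mp ((hh c).mp (List.mem_append_left _ hc))
      have h9 : (57 : Nat) < c.toNat := hnd ha
      have hb' : c.toNat ≤ 57 := hb
      omega
    · rintro ⟨⟨h0, _⟩, _⟩; omega
  by_cases hds : ∀ c ∈ ds, '0' ≤ c ∧ c ≤ '9'
  case neg =>
    rw [pvMask_neg ds 0 hds]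
    simp only [Bool.and_eq_true, decide_eq_true_eq]
    constructor
    · intro hh
      push_neg at hds
      obtain ⟨c, hc, hnd⟩ := hds
      obtain ⟨ha, hb⟩ := (mem_pvNums_iff c).mp ((hh c).mp (List.mem_append_right _ hc))
      have h9 : (57 : Nat) < c.toNat := hnd ha
      have hb' : c.toNat ≤ 57 := hb
      omega
    · rintro ⟨⟨_, h0⟩, _⟩; omega
  -- both all-digit
  rw [show (0 : Int) = ((0 : Nat) : Int) from rfl, pvMask_eq_natMask cs 0 hcs, pvMask_eq_natMask ds 0 hds,
      PySem.Int.bor_natCast]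
  set n1 := pvNatMask cs 0
  set n2 := pvNatMask ds 0
  have hn1 : n1 < 1024 := pvNatMask_lt cs 0 (by norm_num) hcs
  have hn2 : n2 < 1024 := pvNatMask_lt ds 0 (by norm_num) hds
  have htb1 : ∀ d < 10, (n1.testBit d ↔ Char.ofNat (48 + d) ∈ cs) := by
    intro d hd
    rw [pvNatMask_testBit cs 0 d hd hcs]; simp
  have htb2 : ∀ d < 10, (n2.testBit d ↔ Char.ofNat (48 + d) ∈ ds) := by
    intro d hd
    rw [pvNatMask_testBit ds 0 d hd hds]; simp
  simp only [Bool.and_eq_true, decide_eq_true_eq, beq_iff_eq]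
  have hcast : ((n1 ||| n2 : Nat) : Int) = 1023 ↔ (n1 ||| n2) = 1023 := by
    constructor
    · intro hh; exact_mod_cast hh
    · intro hh; exact_mod_cast congrArg (Nat.cast : Nat → Int) hh
  constructor
  · intro hh
    refine ⟨⟨by positivity, by positivity⟩, ?_⟩
    rw [hcast]
    have hor : n1 ||| n2 < 1024 := Nat.or_lt_two_pow (n := 10) (by norm_num [hn1]) (by norm_num [hn2])
    apply Nat.eq_of_testBit_eq
    intro i
    rw [show (1023 : Nat) = 2 ^ 10 - 1 by norm_num, Nat.testBit_two_pow_sub_one]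
    by_cases hi : i < 10
    · simp only [hi, decide_true]
      rw [Nat.testBit_or]
      have hmem : Char.ofNat (48 + i) ∈ pvNums := by
        interval_cases i <;> decide
      have := (hh _).mpr hmem
      rcases List.mem_append.mp this with hin | hin
      · rw [(htb1 i hi).mpr hin]; simp
      · rw [(htb2 i hi).mpr hin]; simp
    · simp only [hi, decide_false]
      exact Nat.testBit_lt_two_pow (by calc n1 ||| n2 < 1024 := hor
                                          _ = 2 ^ 10 := by norm_num
                                          _ ≤ 2 ^ i := Nat.pow_le_pow_right (by norm_num) (by omega))
  · rintro ⟨-, hor⟩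
    rw [hcast] at hor
    intro x
    constructor
    · intro hx
      rw [mem_pvNums_iff]
      rcases List.mem_append.mp hx with hin | hin
      · exact hcs x hin
      · exact hds x hin
    · intro hx
      rw [mem_pvNums_iff] at hx
      obtain ⟨h1, h2⟩ := hx
      have hlo : 48 ≤ x.toNat := h1
      have hhi : x.toNat ≤ 57 := h2
      have hd : x.toNat - 48 < 10 := by omega
      have hxeq : x = Char.ofNat (48 + (x.toNat - 48)) := by
        have : 48 + (x.toNat - 48) = x.toNat := by omega
        rw [this, Char.ofNat_toNat]
      have hbit : (n1 ||| n2).testBit (x.toNat - 48) = true := by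
        rw [hor, show (1023 : Nat) = 2 ^ 10 - 1 by norm_num, Nat.testBit_two_pow_sub_one]
        simp [hd]
      rw [Nat.testBit_or, Bool.or_eq_true_iff] at hbit
      rcases hbit with hb | hb
      · exact List.mem_append_left _ (by rw [hxeq]; exact (htb1 _ hd).mp hb)
      · exact List.mem_append_right _ (by rw [hxeq]; exact (htb2 _ hd).mp hb)

theorem pvALoop_row (t : List String) :
    ∀ k rp lp acc, t.length - rp = k + 1 → lp < t.length - 1 → lp < rp → rp < t.length →
    pvALoop t lp rp acc =
      pvALoop t (lp + 1) (lp + 2) (acc + ((t.drop rp).countP (pvPA (t.getD lp "")) : Int)) := by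
  intro k
  induction k with
  | zero =>
    intro rp lp acc hk hlp hlr hrp
    rw [pvALoop]
    have hcond : rp < t.length ∧ lp < t.length - 1 := ⟨hrp, hlp⟩
    rw [dif_pos hcond]
    have hend : rp + 1 = t.length := by omega
    rw [if_pos hend]
    congr 1
    rw [List.drop_eq_getElem_cons hrp]
    have hdrop : t.drop (rp + 1) = [] := by
      rw [List.drop_eq_nil_iff]; omega
    rw [hdrop]
    simp only [PySem.List.pyGetD_natCast, List.countP_cons, List.countP_nil, pvPA]
    have hget : t.getD rp "" = t[rp] := List.getD_eq_getElem t "" hrp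
    rw [hget]
    split_ifs <;> simp_all
  | succ k ih =>
    intro rp lp acc hk hlp hlr hrp
    rw [pvALoop]
    have hcond : rp < t.length ∧ lp < t.length - 1 := ⟨hrp, hlp⟩
    rw [dif_pos hcond]
    have hend : ¬ (rp + 1 = t.length) := by omega
    rw [if_neg hend]
    rw [ih (rp + 1) lp _ (by omega) hlp (by omega) (by omega)]
    congr 1
    rw [List.drop_eq_getElem_cons hrp]
    simp only [PySem.List.pyGetD_natCast, List.countP_cons, pvPA]
    have hget : t.getD rp "" = t[rp] := List.getD_eq_getElem t "" hrp
    rw [hget]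
    split_ifs <;> push_cast <;> simp_all <;> ring

theorem pvRows_short (l : List String) (h : l.length ≤ 1) : pvRows l = 0 := by
  match l, h with
  | [], _ => rfl
  | [s], _ => simp [pvRows]

theorem pvALoop_rows (t : List String) :
    ∀ j lp acc, t.length - lp = j →
    pvALoop t lp (lp + 1) acc = acc + pvRows (t.drop lp) := by
  intro j
  induction j with
  | zero =>
    intro lp acc hj
    rw [pvALoop]
    rw [dif_neg (by omega)]
    rw [pvRows_short _ (by simp; omega)]
    ring
  | succ j ih =>
    intro lp acc hj
    by_cases hlp : lp < t.length - 1
    · rw [pvALoop_row t (t.length - lp - 2) (lp + 1) lp acc (by omega) hlp (by omega) (by omega)]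
      rw [ih (lp + 1) _ (by omega)]
      have hlt : lp < t.length := by omega
      rw [List.drop_eq_getElem_cons hlt]
      rw [pvRows]
      have hget : t.getD lp "" = t[lp] := List.getD_eq_getElem t "" hlt
      rw [hget]
      ring
    · rw [pvALoop, dif_neg (by omega), pvRows_short _ (by simp; omega)]
      ring

theorem pvBLoop_acc (masks : List Int) : ∀ total, pvBLoop masks total = total + pvBLoop masks 0 := by
  induction masks with
  | nil => intro total; simp [pvBLoop]
  | cons m rest ih =>
    intro total
    simp only [pvBLoop]
    rw [ih, ih (if 0 ≤ m then 0 + _ else 0)]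
    split_ifs <;> ring

theorem pvRows_eq_bLoop (l : List String) :
    pvRows l = pvBLoop (l.map (fun t => pvMask t.toList 0)) 0 := by
  induction l with
  | nil => rfl
  | cons s rest ih =>
    simp only [pvRows, List.map_cons, pvBLoop]
    rw [pvBLoop_acc, ← ih]
    have hcnt : ((rest.countP (pvPA s) : Nat) : Int) =
        if 0 ≤ pvMask s.toList 0 then
          (((rest.map (fun t => pvMask t.toList 0)).countP
            (fun m2 => decide (0 ≤ m2) && (PySem.Int.bor (pvMask s.toList 0) m2 == 1023)) : Nat) : Int)
        else 0 := by
      split_ifs with hs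
      · rw [List.countP_map]
        congr 1
        apply List.countP_congr
        intro u _
        rw [pvPA_eq_mask s u]
        simp [hs]
      · rw [show (rest.countP (pvPA s)) = 0 from List.countP_eq_zero.mpr ?_]
        · simp
        · intro u _
          rw [pvPA_eq_mask s u]
          simp [hs]
    rw [hcnt]
    split_ifs <;> ring

-- ===== VERDICT (by name: the statement is the Claim_ definition above) =====
theorem winningLotteryTicket_spec : Claim_equal_winningLotteryTicket := by
  intro tickets _
  unfold Spec_winningLotteryTicket winningLotteryTicket winningLotteryTicket_alt
  have h := pvALoop_rows tickets tickets.length 0 0 (by omega)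
  simp only [List.drop_zero, zero_add] at h
  rw [show (1 : Nat) = 0 + 1 from rfl] at h
  rw [h, pvRows_eq_bLoop]
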